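-- pv_equiv track=rewrite | github.com/kevintanjc/bleep | backend/src/pipeline.py | _union_boxes_for_span
-- ===== SOURCE A (Python) =====
-- from typing import List, Dict, Any, Tuple, Optional
--
-- def _union_boxes_for_span(spans: List[Tuple[int, int, Tuple[int, int, int, int]]], s: int, e: int) -> Optional[List[int]]:
--     hit = [b for ws, we, b in spans if not (e <= ws or s >= we)]
--     if not hit:
--         return None
--     x1 = min(b[0] for b in hit)
--     y1 = min(b[1] for b in hit)
--     x2 = max(b[2] for b in hit)
--     y2 = max(b[3] for b in hit)
--     return [x1, y1, x2, y2]
-- ===== SOURCE B (Python) =====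
-- from typing import List, Tuple, Optional
--
-- def _union_boxes_for_span(spans: List[Tuple[int, int, Tuple[int, int, int, int]]], s: int, e: int) -> Optional[List[int]]:
--     acc = None  # running (x1, y1, x2, y2)
--     for ws, we, b in spans:
--         if e <= ws or s >= we:
--             continue
--         if acc is None:
--             acc = (b[0], b[1], b[2], b[3])
--         else:
--             acc = (min(acc[0], b[0]), min(acc[1], b[1]),
--                    max(acc[2], b[2]), max(acc[3], b[3]))
--     if acc is None:
--         return None
--     return [acc[0], acc[1], acc[2], acc[3]]
-- ===== Notes on version B (the rewrite author's own statement) =====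
-- stated objective: alternative
-- what changed: Replaces the filter-then-four-separate-min/max-reductions with a single pass over spans maintaining one running (x1,y1,x2,y2) accumulator (None until the first overlapping span).
import Mathlib
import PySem

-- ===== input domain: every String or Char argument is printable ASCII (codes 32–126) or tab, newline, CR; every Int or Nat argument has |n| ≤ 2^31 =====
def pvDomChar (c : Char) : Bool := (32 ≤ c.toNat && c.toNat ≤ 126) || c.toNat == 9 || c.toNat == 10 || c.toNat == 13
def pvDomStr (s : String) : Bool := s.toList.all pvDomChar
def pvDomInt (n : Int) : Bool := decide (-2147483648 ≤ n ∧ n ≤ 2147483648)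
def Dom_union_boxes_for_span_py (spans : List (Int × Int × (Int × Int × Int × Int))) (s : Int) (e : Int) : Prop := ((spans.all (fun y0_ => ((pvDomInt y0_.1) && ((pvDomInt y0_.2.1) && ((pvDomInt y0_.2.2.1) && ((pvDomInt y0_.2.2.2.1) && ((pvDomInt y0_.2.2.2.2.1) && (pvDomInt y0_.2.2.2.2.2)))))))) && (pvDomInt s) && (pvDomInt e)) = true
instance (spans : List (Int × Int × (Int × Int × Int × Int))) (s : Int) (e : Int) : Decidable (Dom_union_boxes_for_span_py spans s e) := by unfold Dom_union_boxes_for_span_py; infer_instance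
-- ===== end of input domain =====

-- B replaces A's filter + four separate min/max reductions by a single accumulating pass
-- (objective: alternative decomposition, same asymptotic cost).

-- ===== PORT A =====
-- hit = [b for ws, we, b in spans if not (e <= ws or s >= we)]; then four reductions.
def union_boxes_for_span_py (spans : List (Int × Int × (Int × Int × Int × Int))) (s : Int) (e : Int) : Option (List Int) :=
  let hit := (spans.filter (fun t => !(decide (e ≤ t.1) || decide (s ≥ t.2.1)))).map (fun t => t.2.2)
  match hit with
  | [] => none
  | h :: t =>
    some [List.foldl min h.1 (t.map (fun b => b.1)),
          List.foldl min h.2.1 (t.map (fun b => b.2.1)),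
          List.foldl max h.2.2.1 (t.map (fun b => b.2.2.1)),
          List.foldl max h.2.2.2 (t.map (fun b => b.2.2.2))]

-- ===== PORT B =====
-- single loop over spans with an Option accumulator (None until the first overlapping span)
def ubLoop (s : Int) (e : Int) : List (Int × Int × (Int × Int × Int × Int)) → Option (Int × Int × Int × Int) → Option (Int × Int × Int × Int)
  | [], acc => acc
  | (ws, we, b) :: rest, acc =>
    if e ≤ ws ∨ s ≥ we then ubLoop s e rest acc
    else match acc with
      | none => ubLoop s e rest (some (b.1, b.2.1, b.2.2.1, b.2.2.2))
      | some q => ubLoop s e rest (some (min q.1 b.1, min q.2.1 b.2.1, max q.2.2.1 b.2.2.1, max q.2.2.2 b.2.2.2))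

def union_boxes_for_span_py_alt (spans : List (Int × Int × (Int × Int × Int × Int))) (s : Int) (e : Int) : Option (List Int) :=
  match ubLoop s e spans none with
  | none => none
  | some q => some [q.1, q.2.1, q.2.2.1, q.2.2.2]

-- ===== PRECONDITION & SPEC =====
def Spec_union_boxes_for_span_py (spans : List (Int × Int × (Int × Int × Int × Int))) (s : Int) (e : Int) (out : Option (List Int)) : Prop := out = union_boxes_for_span_py_alt spans s e
instance (spans : List (Int × Int × (Int × Int × Int × Int))) (s : Int) (e : Int) (out : Option (List Int)) : Decidable (Spec_union_boxes_for_span_py spans s e out) := by unfold Spec_union_boxes_for_span_py; infer_instance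

-- ===== CLAIM (what is proved, stated in full; the proofs are below) =====
def Claim_equal_union_boxes_for_span_py : Prop := ∀ (spans : List (Int × Int × (Int × Int × Int × Int))) (s : Int) (e : Int), Dom_union_boxes_for_span_py spans s e → Spec_union_boxes_for_span_py spans s e (union_boxes_for_span_py spans s e)

-- ===== LEMMAS AND PROOFS =====

def ubHit (s : Int) (e : Int) (spans : List (Int × Int × (Int × Int × Int × Int))) : List (Int × Int × Int × Int) :=
  (spans.filter (fun t => !(decide (e ≤ t.1) || decide (s ≥ t.2.1)))).map (fun t => t.2.2)

def ubComb (q b : Int × Int × Int × Int) : Int × Int × Int × Int :=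
  (min q.1 b.1, min q.2.1 b.2.1, max q.2.2.1 b.2.2.1, max q.2.2.2 b.2.2.2)

theorem ubHit_cons (s e ws we : Int) (b : Int × Int × Int × Int) (tl : List (Int × Int × (Int × Int × Int × Int))) :
    ubHit s e ((ws, we, b) :: tl) = if e ≤ ws ∨ s ≥ we then ubHit s e tl else b :: ubHit s e tl := by
  unfold ubHit
  rw [List.filter_cons]
  by_cases h : e ≤ ws ∨ s ≥ we
  · simp [h]
    rw [if_neg (by omega)]
  · obtain ⟨h1, h2⟩ := not_or.mp h
    simp [h1, h2]

theorem ubLoop_some (s e : Int) (spans : List (Int × Int × (Int × Int × Int × Int))) :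
    ∀ q, ubLoop s e spans (some q) = some ((ubHit s e spans).foldl ubComb q) := by
  induction spans with
  | nil => intro q; rfl
  | cons hd tl ih =>
    intro q
    obtain ⟨ws, we, b⟩ := hd
    rw [ubHit_cons]
    simp only [ubLoop]
    split_ifs with h
    · exact ih q
    · rw [List.foldl_cons]
      exact ih _

theorem ubLoop_none (s e : Int) (spans : List (Int × Int × (Int × Int × Int × Int))) :
    ubLoop s e spans none = match ubHit s e spans with
      | [] => none
      | h :: t => some (t.foldl ubComb h) := by
  induction spans with
  | nil => rfl
  | cons hd tl ih =>
    obtain ⟨ws, we, b⟩ := hd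
    rw [ubHit_cons]
    simp only [ubLoop]
    split_ifs with h
    · exact ih
    · rw [ubLoop_some]

theorem ubFold_comb (t : List (Int × Int × Int × Int)) :
    ∀ h : Int × Int × Int × Int, t.foldl ubComb h =
      (List.foldl min h.1 (t.map (fun b => b.1)),
       List.foldl min h.2.1 (t.map (fun b => b.2.1)),
       List.foldl max h.2.2.1 (t.map (fun b => b.2.2.1)),
       List.foldl max h.2.2.2 (t.map (fun b => b.2.2.2))) := by
  induction t with
  | nil => intro h; rfl
  | cons hd tl ih => intro h; simpa [List.foldl, ubComb] using ih (ubComb h hd)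

theorem portA_eq (spans : List (Int × Int × (Int × Int × Int × Int))) (s e : Int) :
    union_boxes_for_span_py spans s e = match ubHit s e spans with
      | [] => none
      | h :: t =>
        some [List.foldl min h.1 (t.map (fun b => b.1)),
              List.foldl min h.2.1 (t.map (fun b => b.2.1)),
              List.foldl max h.2.2.1 (t.map (fun b => b.2.2.1)),
              List.foldl max h.2.2.2 (t.map (fun b => b.2.2.2))] := rfl

-- ===== VERDICT (by name: the statement is the Claim_ definition above) =====
theorem union_boxes_for_span_py_spec : Claim_equal_union_boxes_for_span_py := by
  intro spans s e _
  unfold Spec_union_boxes_for_span_py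
  rw [portA_eq]
  unfold union_boxes_for_span_py_alt
  rw [ubLoop_none]
  cases hhit : ubHit s e spans with
  | nil => rfl
  | cons h t => simp [ubFold_comb]
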